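-- pv_equiv track=rewrite | github.com/cryptomentor139-cell/cryptomentor-bot | app/openclaw_message_handler.py | _get_loading_text
-- ===== SOURCE A (Python) =====
-- def _get_loading_text(message: str, has_photo: bool) -> str:
--     """Get appropriate loading text based on request type"""
--     message_lower = message.lower()
--
--     if has_photo:
--         return "Processing your image..."
--     elif any(word in message_lower for word in ['chart', 'graph', 'candle']):
--         return "Analyzing chart..."
--     elif any(word in message_lower for word in ['signal', 'trade']):
--         return "Generating trading signal..."
--     elif any(word in message_lower for word in ['analyze', 'analysis']):
--         return "Performing deep analysis..."
--     elif any(word in message_lower for word in ['price', 'market']):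
--         return "Checking market data..."
--     elif any(word in message_lower for word in ['news', 'update']):
--         return "Fetching latest news..."
--     elif any(word in message_lower for word in ['portfolio', 'balance']):
--         return "Calculating portfolio..."
--     elif any(word in message_lower for word in ['risk', 'safe']):
--         return "Assessing risk..."
--     elif len(message) > 200:
--         return "Processing your detailed request..."
--     else:
--         return "Thinking..."
-- ===== SOURCE B (Python) =====
-- _KEYWORDS = {
--     'chart': (0, "Analyzing chart..."),
--     'graph': (0, "Analyzing chart..."),
--     'candle': (0, "Analyzing chart..."),
--     'signal': (1, "Generating trading signal..."),
--     'trade': (1, "Generating trading signal..."),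
--     'analyze': (2, "Performing deep analysis..."),
--     'analysis': (2, "Performing deep analysis..."),
--     'price': (3, "Checking market data..."),
--     'market': (3, "Checking market data..."),
--     'news': (4, "Fetching latest news..."),
--     'update': (4, "Fetching latest news..."),
--     'portfolio': (5, "Calculating portfolio..."),
--     'balance': (5, "Calculating portfolio..."),
--     'risk': (6, "Assessing risk..."),
--     'safe': (6, "Assessing risk..."),
-- }
--
-- def _get_loading_text(message: str, has_photo: bool) -> str:
--     if has_photo:
--         return "Processing your image..."
--     message_lower = message.lower()
--     best = None  # (rank, text) of the highest-priority keyword found so far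
--     for kw, (rank, text) in _KEYWORDS.items():
--         if kw in message_lower and (best is None or rank < best[0]):
--             best = (rank, text)
--     if best is not None:
--         return best[1]
--     return "Processing your detailed request..." if len(message) > 200 else "Thinking..."
-- ===== Notes on version B (the rewrite author's own statement) =====
-- stated objective: alternative
-- what changed: Replaced the short-circuiting eight-branch elif chain of group membership tests by a single argmin pass: a flat keyword->(priority,text) map is scanned once, keeping the matched keyword of minimal priority in an accumulator, with the photo guard and the length/default fallback unchanged.
import Mathlib
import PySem

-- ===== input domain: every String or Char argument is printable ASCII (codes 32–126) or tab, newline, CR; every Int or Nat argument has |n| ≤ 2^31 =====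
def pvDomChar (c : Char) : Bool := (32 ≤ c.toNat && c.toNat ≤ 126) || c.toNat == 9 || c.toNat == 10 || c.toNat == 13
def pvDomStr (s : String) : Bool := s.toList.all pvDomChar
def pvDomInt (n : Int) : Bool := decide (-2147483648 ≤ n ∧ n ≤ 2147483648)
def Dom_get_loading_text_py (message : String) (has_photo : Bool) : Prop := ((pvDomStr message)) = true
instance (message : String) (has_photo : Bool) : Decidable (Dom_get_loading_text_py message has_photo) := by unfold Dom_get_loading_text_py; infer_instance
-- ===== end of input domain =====

-- B replaces A's short-circuiting elif chain by one argmin pass over a flat keyword -> (priority, text) map; objective: alternative.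

-- ===== PORT A =====
def get_loading_text_py (message : String) (has_photo : Bool) : String :=
  let message_lower := PySem.Str.lower message
  if has_photo then "Processing your image..."
  else if ["chart", "graph", "candle"].any (fun word => PySem.Str.isIn word message_lower) then "Analyzing chart..."
  else if ["signal", "trade"].any (fun word => PySem.Str.isIn word message_lower) then "Generating trading signal..."
  else if ["analyze", "analysis"].any (fun word => PySem.Str.isIn word message_lower) then "Performing deep analysis..."
  else if ["price", "market"].any (fun word => PySem.Str.isIn word message_lower) then "Checking market data..."
  else if ["news", "update"].any (fun word => PySem.Str.isIn word message_lower) then "Fetching latest news..."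
  else if ["portfolio", "balance"].any (fun word => PySem.Str.isIn word message_lower) then "Calculating portfolio..."
  else if ["risk", "safe"].any (fun word => PySem.Str.isIn word message_lower) then "Assessing risk..."
  else if (PySem.Str.len message : Int) > 200 then "Processing your detailed request..."
  else "Thinking..."

-- ===== PORT B =====
-- the flat keyword -> (priority, text) map of Source B (a Python dict, ported as an association list in insertion order)
def pvKeywordMap : List (String × Int × String) :=
  [ ("chart", (0, "Analyzing chart..."))
  , ("graph", (0, "Analyzing chart..."))
  , ("candle", (0, "Analyzing chart..."))
  , ("signal", (1, "Generating trading signal..."))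
  , ("trade", (1, "Generating trading signal..."))
  , ("analyze", (2, "Performing deep analysis..."))
  , ("analysis", (2, "Performing deep analysis..."))
  , ("price", (3, "Checking market data..."))
  , ("market", (3, "Checking market data..."))
  , ("news", (4, "Fetching latest news..."))
  , ("update", (4, "Fetching latest news..."))
  , ("portfolio", (5, "Calculating portfolio..."))
  , ("balance", (5, "Calculating portfolio..."))
  , ("risk", (6, "Assessing risk..."))
  , ("safe", (6, "Assessing risk...")) ]

def get_loading_text_py_alt (message : String) (has_photo : Bool) : String :=
  if has_photo then "Processing your image..."
  else
    let message_lower := PySem.Str.lower message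
    let best := pvKeywordMap.foldl
      (fun best e =>
        if PySem.Str.isIn e.1 message_lower &&
           (match best with
            | none => true
            | some b => decide (e.2.1 < b.1)) then
          some e.2
        else best) none
    match best with
    | some b => b.2
    | none =>
        if (PySem.Str.len message : Int) > 200 then "Processing your detailed request..."
        else "Thinking..."

-- ===== PRECONDITION & SPEC =====
def Spec_get_loading_text_py (message : String) (has_photo : Bool) (out : String) : Prop := out = get_loading_text_py_alt message has_photo
instance (message : String) (has_photo : Bool) (out : String) : Decidable (Spec_get_loading_text_py message has_photo out) := by unfold Spec_get_loading_text_py; infer_instance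

-- ===== CLAIM (what is proved, stated in full; the proofs are below) =====
def Claim_equal_get_loading_text_py : Prop := ∀ (message : String) (has_photo : Bool), Dom_get_loading_text_py message has_photo → Spec_get_loading_text_py message has_photo (get_loading_text_py message has_photo)

-- ===== LEMMAS AND PROOFS =====

-- ===== VERDICT (by name: the statement is the Claim_ definition above) =====
set_option maxHeartbeats 4000000 in
theorem get_loading_text_py_spec : Claim_equal_get_loading_text_py := by
  intro message has_photo _
  cases has_photo
  · unfold Spec_get_loading_text_py get_loading_text_py get_loading_text_py_alt pvKeywordMap
    by_cases h1 : PySem.Chars.isIn ['c', 'h', 'a', 'r', 't'] (PySem.Chars.lower message.toList) = true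
    · simp [h1]
    · by_cases h2 : PySem.Chars.isIn ['g', 'r', 'a', 'p', 'h'] (PySem.Chars.lower message.toList) = true
      · simp [h1, h2]
      · by_cases h3 : PySem.Chars.isIn ['c', 'a', 'n', 'd', 'l', 'e'] (PySem.Chars.lower message.toList) = true
        · simp [h1, h2, h3]
        · by_cases h4 : PySem.Chars.isIn ['s', 'i', 'g', 'n', 'a', 'l'] (PySem.Chars.lower message.toList) = true
          · simp [h1, h2, h3, h4]
          · by_cases h5 : PySem.Chars.isIn ['t', 'r', 'a', 'd', 'e'] (PySem.Chars.lower message.toList) = true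
            · simp [h1, h2, h3, h4, h5]
            · by_cases h6 : PySem.Chars.isIn ['a', 'n', 'a', 'l', 'y', 'z', 'e'] (PySem.Chars.lower message.toList) = true
              · simp [h1, h2, h3, h4, h5, h6]
              · by_cases h7 : PySem.Chars.isIn ['a', 'n', 'a', 'l', 'y', 's', 'i', 's'] (PySem.Chars.lower message.toList) = true
                · simp [h1, h2, h3, h4, h5, h6, h7]
                · by_cases h8 : PySem.Chars.isIn ['p', 'r', 'i', 'c', 'e'] (PySem.Chars.lower message.toList) = true
                  · simp [h1, h2, h3, h4, h5, h6, h7, h8]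
                  · by_cases h9 : PySem.Chars.isIn ['m', 'a', 'r', 'k', 'e', 't'] (PySem.Chars.lower message.toList) = true
                    · simp [h1, h2, h3, h4, h5, h6, h7, h8, h9]
                    · by_cases h10 : PySem.Chars.isIn ['n', 'e', 'w', 's'] (PySem.Chars.lower message.toList) = true
                      · simp [h1, h2, h3, h4, h5, h6, h7, h8, h9, h10]
                      · by_cases h11 : PySem.Chars.isIn ['u', 'p', 'd', 'a', 't', 'e'] (PySem.Chars.lower message.toList) = true
                        · simp [h1, h2, h3, h4, h5, h6, h7, h8, h9, h10, h11]
                        · by_cases h12 : PySem.Chars.isIn ['p', 'o', 'r', 't', 'f', 'o', 'l', 'i', 'o'] (PySem.Chars.lower message.toList) = true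
                          · simp [h1, h2, h3, h4, h5, h6, h7, h8, h9, h10, h11, h12]
                          · by_cases h13 : PySem.Chars.isIn ['b', 'a', 'l', 'a', 'n', 'c', 'e'] (PySem.Chars.lower message.toList) = true
                            · simp [h1, h2, h3, h4, h5, h6, h7, h8, h9, h10, h11, h12, h13]
                            · by_cases h14 : PySem.Chars.isIn ['r', 'i', 's', 'k'] (PySem.Chars.lower message.toList) = true
                              · simp [h1, h2, h3, h4, h5, h6, h7, h8, h9, h10, h11, h12, h13, h14]
                              · by_cases h15 : PySem.Chars.isIn ['s', 'a', 'f', 'e'] (PySem.Chars.lower message.toList) = true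
                                · simp [h1, h2, h3, h4, h5, h6, h7, h8, h9, h10, h11, h12, h13, h14, h15]
                                · simp [h1, h2, h3, h4, h5, h6, h7, h8, h9, h10, h11, h12, h13, h14, h15]
  · rfl
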